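-- pv_equiv track=rewrite | github.com/DiegoOCruz/TP2_PB | ex_6.4.py | contagem_pintura
-- ===== SOURCE A (Python) =====
-- def contagem_pintura(N, C):
--     #cadeira i está pintada com a cor j
--     dp = [[0 for _ in range(C)] for _ in range(N)]
--
--     # Inicialização: qualquer cadeira pode ser pintada de qualquer cor inicialmente
--     for j in range(C):
--         dp[0][j] = 1
--
--     # Preenchendo a tabela dp
--     for i in range(1, N):
--         for j in range(C):
--             dp[i][j] = sum(dp[i-1][k] for k in range(C) if k != j)
--
--
--     return sum(dp[N-1][j] for j in range(C))
-- ===== SOURCE B (Python) =====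
-- def contagem_pintura(N, C):
--     # Closed form C*(C-1)^(N-1), with the power computed by binary exponentiation.
--     if C <= 0 or N <= 0:
--         return 0
--     base, e, acc = C - 1, N - 1, 1
--     while e > 0:
--         if e & 1:
--             acc *= base
--         base *= base
--         e >>= 1
--     return C * acc
-- ===== Notes on version B (the rewrite author's own statement) =====
-- stated objective: faster
-- what changed: Replaces the O(N*C^2) dynamic-programming table with the closed form C*(C-1)^(N-1) computed by binary exponentiation.
import Mathlib
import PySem

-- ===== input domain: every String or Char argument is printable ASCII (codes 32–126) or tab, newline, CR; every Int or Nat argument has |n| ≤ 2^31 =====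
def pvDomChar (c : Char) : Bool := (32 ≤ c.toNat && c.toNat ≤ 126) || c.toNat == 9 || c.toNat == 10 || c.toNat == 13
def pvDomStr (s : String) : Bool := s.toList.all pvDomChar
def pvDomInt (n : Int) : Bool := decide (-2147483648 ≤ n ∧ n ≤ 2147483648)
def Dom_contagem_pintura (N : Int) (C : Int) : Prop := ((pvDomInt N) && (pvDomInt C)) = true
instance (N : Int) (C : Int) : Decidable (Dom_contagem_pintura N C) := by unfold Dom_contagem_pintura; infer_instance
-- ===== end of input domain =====

-- B replaces A's O(N*C^2) DP table with the closed form C*(C-1)^(N-1) via binary exponentiation (faster, asymptotic).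


-- ===== PORT A =====
-- dp[i][j] = sum(dp[i-1][k] for k in range(C) if k != j)
def pvRowA (c : Nat) (prev : List Int) : List Int :=
  (List.range c).map (fun j =>
    (List.range c).foldl (fun s k => if k ≠ j then s + prev.getD k 0 else s) 0)

def contagem_pintura (N : Int) (C : Int) : Int :=
  let c := C.toNat
  -- dp[0][j] = 1 for all j in range(C)
  let row0 : List Int := List.replicate c 1
  -- for i in range(1, N): compute dp[i] from dp[i-1]
  let last := (List.range (N.toNat - 1)).foldl (fun prev _ => pvRowA c prev) row0
  (List.range c).foldl (fun s j => s + last.getD j 0) 0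

-- ===== PORT B =====
-- binary-exponentiation loop of Source B: while e > 0: if e&1: acc*=base; base*=base; e>>=1
def pvPowBin : Int → Nat → Int → Int
  | _, 0, acc => acc
  | b, e+1, acc => pvPowBin (b*b) ((e+1)/2) (if (e+1) % 2 = 1 then acc*b else acc)
decreasing_by exact Nat.div_lt_self (Nat.succ_pos e) (by norm_num)

def contagem_pintura_alt (N : Int) (C : Int) : Int :=
  if C ≤ 0 ∨ N ≤ 0 then 0
  else C * pvPowBin (C - 1) (N - 1).toNat 1

-- ===== PRECONDITION & SPEC =====
-- Pre_ excludes exactly the inputs where A raises IndexError: C > 0 with N ≤ 0 (dp is empty but dp[0][j] = 1 is attempted).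
def Pre_contagem_pintura (N : Int) (C : Int) : Prop := 0 < C → 0 < N
instance (N : Int) (C : Int) : Decidable (Pre_contagem_pintura N C) := by unfold Pre_contagem_pintura; infer_instance
def pvWitness_contagem_pintura : Int × Int := (3, 2)

def Spec_contagem_pintura (N : Int) (C : Int) (out : Int) : Prop := out = contagem_pintura_alt N C
instance (N : Int) (C : Int) (out : Int) : Decidable (Spec_contagem_pintura N C out) := by unfold Spec_contagem_pintura; infer_instance

-- ===== CLAIM (what is proved, stated in full; the proofs are below) =====
def Claim_equal_contagem_pintura : Prop := ∀ (N : Int) (C : Int), Dom_contagem_pintura N C → Pre_contagem_pintura N C → Spec_contagem_pintura N C (contagem_pintura N C)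

-- ===== LEMMAS AND PROOFS =====

-- binary exponentiation computes acc * b^e
theorem pvPowBin_eq (e : Nat) : ∀ (b acc : Int), pvPowBin b e acc = acc * b ^ e := by
  induction e using Nat.strong_induction_on with
  | _ e ih =>
    match e with
    | 0 => intro b acc; simp [pvPowBin]
    | e+1 =>
      intro b acc
      rw [pvPowBin, ih ((e+1)/2) (Nat.div_lt_self (Nat.succ_pos e) (by norm_num))]
      rcases Nat.mod_two_eq_zero_or_one (e+1) with h2 | h2
      · rw [if_neg (by omega)]
        generalize hq : (e+1)/2 = q
        rw [show e + 1 = 2*q by omega]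
        rw [show b*b = b^2 by ring, ← pow_mul]
      · rw [if_pos h2]
        generalize hq : (e+1)/2 = q
        rw [show e + 1 = 2*q + 1 by omega]
        rw [show b*b = b^2 by ring, ← pow_mul, pow_succ]
        ring

-- summation step over a constant row, skipping index j
theorem foldl_skip (c j : Nat) (v : Int) (a : Int) :
    (List.range c).foldl (fun s k => if k ≠ j then s + (List.replicate c v).getD k 0 else s) a
      = a + (if j < c then (c : Int) - 1 else (c : Int)) * v := by
  have key : ∀ (n : Nat), n ≤ c → ∀ (a : Int),
      (List.range n).foldl (fun s k => if k ≠ j then s + (List.replicate c v).getD k 0 else s) a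
        = a + (if j < n then (n : Int) - 1 else (n : Int)) * v := by
    intro n
    induction n with
    | zero => intro _ a; simp
    | succ m ih =>
      intro hm a
      rw [List.range_succ, List.foldl_append, ih (by omega)]
      have hget : (List.replicate c v).getD m 0 = v := by
        rw [List.getD_eq_getElem?_getD, List.getElem?_replicate]
        simp [Nat.lt_of_succ_le hm]
      simp only [List.foldl_cons, List.foldl_nil]
      by_cases hj : m = j
      · subst hj
        simp only [ne_eq, not_true_eq_false, if_false]
        have h1 : ¬ m < m := lt_irrefl m
        have h2 : m < m + 1 := Nat.lt_succ_self m
        rw [if_neg h1, if_pos h2]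
        push_cast; ring
      · simp only [ne_eq, hj, not_false_eq_true, if_true, hget]
        by_cases hlt : j < m
        · rw [if_pos hlt, if_pos (by omega)]
          push_cast; ring
        · rw [if_neg hlt, if_neg (by omega)]
          push_cast; ring
  simpa using key c le_rfl a

-- a DP step on a constant row multiplies it by (c-1)
theorem pvRowA_replicate (c : Nat) (v : Int) :
    pvRowA c (List.replicate c v) = List.replicate c (((c : Int) - 1) * v) := by
  unfold pvRowA
  rw [List.eq_replicate_iff]
  constructor
  · simp
  · intro b hb
    rcases List.mem_map.mp hb with ⟨j, hj, rfl⟩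
    rw [foldl_skip c j v 0, if_pos (List.mem_range.mp hj)]
    ring

-- the whole DP loop on the constant start row
theorem loop_replicate (c : Nat) (m : Nat) :
    (List.range m).foldl (fun prev _ => pvRowA c prev) (List.replicate c (1 : Int))
      = List.replicate c (((c : Int) - 1) ^ m) := by
  induction m with
  | zero => simp
  | succ k ih =>
    rw [List.range_succ, List.foldl_append, ih]
    simp only [List.foldl_cons, List.foldl_nil]
    rw [pvRowA_replicate c _, pow_succ]
    ring_nf

-- final sum over a constant row
theorem foldl_sum_replicate (c : Nat) (v : Int) :
    (List.range c).foldl (fun s j => s + (List.replicate c v).getD j 0) 0 = (c : Int) * v := by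
  have key : ∀ (n : Nat), n ≤ c → ∀ (a : Int),
      (List.range n).foldl (fun s j => s + (List.replicate c v).getD j 0) a = a + (n : Int) * v := by
    intro n
    induction n with
    | zero => intro _ a; simp
    | succ m ih =>
      intro hm a
      rw [List.range_succ, List.foldl_append, ih (by omega)]
      have hget : (List.replicate c v).getD m 0 = v := by
        rw [List.getD_eq_getElem?_getD, List.getElem?_replicate]
        simp [Nat.lt_of_succ_le hm]
      simp only [List.foldl_cons, List.foldl_nil, hget]
      push_cast; ring
  simpa using key c le_rfl 0

-- ===== VERDICT (by name: the statement is the Claim_ definition above) =====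
theorem contagem_pintura_spec : Claim_equal_contagem_pintura := by
  unfold Claim_equal_contagem_pintura
  intro N C _ hpre
  unfold Spec_contagem_pintura contagem_pintura contagem_pintura_alt
  by_cases hC : C ≤ 0
  · have : C.toNat = 0 := Int.toNat_of_nonpos hC
    simp [this, hC]
  · have hC' : 0 < C := by omega
    have hN : 0 < N := hpre hC' 
    have hcN : C.toNat ≠ 0 := by omega
    rw [if_neg (by omega)]
    simp only []
    rw [loop_replicate C.toNat, foldl_sum_replicate,
        pvPowBin_eq, one_mul]
    have h1 : ((C.toNat : Int)) = C := Int.toNat_of_nonneg (le_of_lt hC')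
    have h2 : (N - 1).toNat = N.toNat - 1 := by omega
    rw [h1, h2]
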